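-- pv_equiv track=rewrite | github.com/villasv/ssh-artwork | randomart.py | hash_to_moves
-- ===== SOURCE A (Python) =====
-- def hash_to_moves(hash):
--     moves =[]
--     for word in hash:
--         for pair in (3, 2, 1, 0):
--             shift = pair*8
--             byte = (word & (255 << shift)) >> shift
--             for step in range(0, 8, 2):
--               mask = 3 << step
--               move = (byte & mask) >> step
--               moves.append(move)
--     return moves
-- ===== SOURCE B (Python) =====
-- # Lookup-table rewrite: the 4 two-bit moves of every possible byte are
-- # precomputed once; hash_to_moves then just slices each word into bytes
-- # (high to low) and concatenates table rows.
-- BYTE_MOVES = [[b & 3, (b >> 2) & 3, (b >> 4) & 3, (b >> 6) & 3] for b in range(256)]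
--
--
-- def hash_to_moves(hash):
--     moves = []
--     for word in hash:
--         for shift in (24, 16, 8, 0):
--             moves.extend(BYTE_MOVES[(word >> shift) & 0xFF])
--     return moves
-- ===== Notes on version B (the rewrite author's own statement) =====
-- stated objective: faster
-- what changed: Replaces the per-word nested bit-extraction loops (16 shift/mask operations per word) with a 256-entry lookup table of per-byte move rows built once, so each word only needs 4 byte extractions and 4 table lookups.
import Mathlib
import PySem

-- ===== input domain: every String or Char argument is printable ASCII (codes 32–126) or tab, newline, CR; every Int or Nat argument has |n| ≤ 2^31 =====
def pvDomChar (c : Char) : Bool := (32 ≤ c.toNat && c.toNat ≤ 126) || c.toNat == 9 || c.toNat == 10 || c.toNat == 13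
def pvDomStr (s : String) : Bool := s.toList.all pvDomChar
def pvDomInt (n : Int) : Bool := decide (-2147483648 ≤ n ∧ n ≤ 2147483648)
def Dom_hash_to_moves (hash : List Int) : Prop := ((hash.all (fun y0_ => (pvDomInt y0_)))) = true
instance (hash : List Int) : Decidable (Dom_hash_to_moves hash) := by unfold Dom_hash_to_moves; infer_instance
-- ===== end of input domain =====

-- B replaces A's 16 per-word shift/mask extractions by a 256-entry per-byte
-- lookup table built once (objective: faster, constant-factor).

-- ===== PORT A =====
-- Literal port of A's nested loops; the per-word loop body is the helper
-- wordMovesA. All shift amounts are nonnegative Int literals, shifted with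
-- Mathlib's Int-by-Int shift (equal to Python's shift on nonnegative amounts).
def wordMovesA (moves : List Int) (word : Int) : List Int :=
  ([3, 2, 1, 0] : List Int).foldl (fun moves pair =>
    let shift : Int := pair * 8
    let byte := (PySem.Int.band word ((255 : Int) <<< shift)) >>> shift
    (PySem.List.pyRange 0 8 2).foldl (fun moves step =>
      let mask := (3 : Int) <<< step
      let move := (PySem.Int.band byte mask) >>> step
      moves ++ [move]) moves) moves

def hash_to_moves (hash : List Int) : List Int :=
  hash.foldl wordMovesA []

-- ===== PORT B =====
-- the module-level table BYTE_MOVES of Source B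
def byteMoves : List (List Int) :=
  (List.range 256).map (fun (b : Nat) =>
    [PySem.Int.band (b : Int) 3,
     PySem.Int.band ((b : Int) >>> (2 : Int)) 3,
     PySem.Int.band ((b : Int) >>> (4 : Int)) 3,
     PySem.Int.band ((b : Int) >>> (6 : Int)) 3])

-- (word >> shift) & 0xFF is always in [0,255], so the table index is in range
-- and `List.getD … []` equals Python's in-range BYTE_MOVES[byte].
def wordMovesB (word : Int) : List Int :=
  ([24, 16, 8, 0] : List Int).flatMap (fun shift =>
    byteMoves.getD (PySem.Int.band (word >>> shift) 255).toNat [])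

def hash_to_moves_alt (hash : List Int) : List Int :=
  hash.flatMap wordMovesB

-- ===== PRECONDITION & SPEC =====
def Spec_hash_to_moves (hash : List Int) (out : List Int) : Prop := out = hash_to_moves_alt hash
instance (hash : List Int) (out : List Int) : Decidable (Spec_hash_to_moves hash out) := by unfold Spec_hash_to_moves; infer_instance

-- ===== CLAIM (what is proved, stated in full; the proofs are below) =====
def Claim_equal_hash_to_moves : Prop := ∀ (hash : List Int), Dom_hash_to_moves hash → Spec_hash_to_moves hash (hash_to_moves hash)

-- ===== LEMMAS AND PROOFS =====

theorem testBit_255 (i : Nat) : (255 : Nat).testBit i = decide (i < 8) := by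
  have h : (255 : Nat) = 2 ^ 8 - 1 := rfl
  rw [h, Nat.testBit_two_pow_sub_one]

-- masking with a shifted block then unshifting = unshifting then masking
theorem nat_mask_shift (n s m : Nat) :
    (n &&& (m <<< s)) >>> s = (n >>> s) &&& m := by
  apply Nat.eq_of_testBit_eq
  intro i
  simp [Nat.testBit_and, Nat.testBit_shiftLeft, Nat.testBit_shiftRight,
    show s + i - s = i by omega]

theorem nat_block_and (k s : Nat) :
    (255 <<< s) &&& k = ((k >>> s) &&& 255) <<< s := by
  apply Nat.eq_of_testBit_eq
  intro i
  simp [Nat.testBit_and, Nat.testBit_shiftLeft, Nat.testBit_shiftRight, testBit_255]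
  by_cases h : s ≤ i
  · rw [show s + (i - s) = i by omega]
    simp [h, Bool.and_comm]
  · simp [h]

theorem nat_block_neg (k s : Nat) :
    ((255 <<< s) - ((255 <<< s) &&& k)) >>> s = 255 - ((k >>> s) &&& 255) := by
  rw [nat_block_and]
  have h : (255 <<< s) - (((k >>> s) &&& 255) <<< s)
      = (255 - ((k >>> s) &&& 255)) <<< s := by
    simp [Nat.shiftLeft_eq, Nat.sub_mul]
  rw [h, Nat.shiftLeft_shiftRight]

theorem cast_shiftRight (n s : Nat) : ((n : Int) >>> s) = ((n >>> s : Nat) : Int) := rfl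

theorem band_cast (a b : Nat) :
    PySem.Int.band (a : Int) (b : Int) = ((a &&& b : Nat) : Int) := by
  unfold PySem.Int.band
  simp

theorem band_negSucc_cast (k m : Nat) :
    PySem.Int.band (Int.negSucc k) (m : Int) = ((m - (m &&& k) : Nat) : Int) := by
  unfold PySem.Int.band
  rw [if_neg (by omega), if_pos (by omega)]
  simp [Int.negSucc_eq]

-- A's byte and B's byte agree and are a Nat below 256
theorem byte_key (w : Int) (s : Nat) :
    ∃ n : Nat, n < 256 ∧
      (PySem.Int.band w ((255 : Int) <<< (s : Int))) >>> (s : Int) = (n : Int) ∧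
      PySem.Int.band (w >>> (s : Int)) 255 = (n : Int) := by
  have h255 : ((255 : Int) <<< (s : Int)) = ((255 <<< s : Nat) : Int) := by
    rw [Int.shiftLeft_natCast_right]; rfl
  cases w with
  | ofNat n =>
    refine ⟨(n >>> s) &&& 255, ?_, ?_, ?_⟩
    · have := Nat.and_le_right (n := n >>> s) (m := 255); omega
    · rw [show Int.ofNat n = ((n : Nat) : Int) from rfl, h255, band_cast,
        Int.shiftRight_natCast_right, cast_shiftRight, nat_mask_shift]
    · rw [show Int.ofNat n = ((n : Nat) : Int) from rfl,
        Int.shiftRight_natCast_right, cast_shiftRight,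
        show (255 : Int) = ((255 : Nat) : Int) from rfl, band_cast]
  | negSucc k =>
    refine ⟨255 - ((k >>> s) &&& 255), by omega, ?_, ?_⟩
    · rw [h255, band_negSucc_cast, Int.shiftRight_natCast_right, cast_shiftRight,
        nat_block_neg]
    · rw [Int.shiftRight_natCast_right, Int.negSucc_shiftRight,
        show (255 : Int) = ((255 : Nat) : Int) from rfl, band_negSucc_cast,
        Nat.and_comm]

-- one 2-bit step of A's inner loop, done on a byte value
theorem step_eq (n t : Nat) :
    (PySem.Int.band (n : Int) ((3 : Int) <<< (t : Int))) >>> (t : Int)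
      = PySem.Int.band ((n : Int) >>> (t : Int)) 3 := by
  have h3 : ((3 : Int) <<< (t : Int)) = ((3 <<< t : Nat) : Int) := by
    rw [Int.shiftLeft_natCast_right]; rfl
  rw [h3, band_cast, Int.shiftRight_natCast_right, Int.shiftRight_natCast_right,
    cast_shiftRight, nat_mask_shift, cast_shiftRight,
    show (3 : Int) = ((3 : Nat) : Int) from rfl, band_cast]

-- within a byte, A's step loop equals B's table row
theorem inner_eq (n : Nat) (acc : List Int) :
    (PySem.List.pyRange 0 8 2).foldl (fun moves step =>
        moves ++ [(PySem.Int.band (n : Int) ((3 : Int) <<< step)) >>> step]) acc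
    = acc ++ [PySem.Int.band (n : Int) 3,
              PySem.Int.band ((n : Int) >>> (2 : Int)) 3,
              PySem.Int.band ((n : Int) >>> (4 : Int)) 3,
              PySem.Int.band ((n : Int) >>> (6 : Int)) 3] := by
  rw [show PySem.List.pyRange 0 8 2 = [0, 2, 4, 6] from rfl]
  simp only [List.foldl_cons, List.foldl_nil]
  rw [show (0 : Int) = ((0 : Nat) : Int) from rfl,
    show (2 : Int) = ((2 : Nat) : Int) from rfl,
    show (4 : Int) = ((4 : Nat) : Int) from rfl,
    show (6 : Int) = ((6 : Nat) : Int) from rfl,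
    step_eq n 0, step_eq n 2, step_eq n 4, step_eq n 6]
  have h0 : PySem.Int.band ((n : Int) >>> ((0 : Nat) : Int)) 3 = PySem.Int.band (n : Int) 3 := by
    rw [Int.shiftRight_natCast_right, cast_shiftRight, Nat.shiftRight_zero]
  rw [h0]
  simp [List.append_assoc]

theorem getD_byteMoves (n : Nat) (h : n < 256) :
    byteMoves.getD n []
    = [PySem.Int.band (n : Int) 3,
       PySem.Int.band ((n : Int) >>> (2 : Int)) 3,
       PySem.Int.band ((n : Int) >>> (4 : Int)) 3,
       PySem.Int.band ((n : Int) >>> (6 : Int)) 3] := by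
  unfold byteMoves
  rw [List.getD_eq_getElem?_getD]
  simp [h]

theorem word_eq (acc : List Int) (w : Int) :
    wordMovesA acc w = acc ++ wordMovesB w := by
  obtain ⟨n3, l3, a3, b3⟩ := byte_key w 24
  obtain ⟨n2, l2, a2, b2⟩ := byte_key w 16
  obtain ⟨n1, l1, a1, b1⟩ := byte_key w 8
  obtain ⟨n0, l0, a0, b0⟩ := byte_key w 0
  have a3' : (PySem.Int.band w ((255 : Int) <<< ((3 : Int) * 8))) >>> ((3 : Int) * 8) = (n3 : Int) := by
    rw [show ((3 : Int) * 8) = ((24 : Nat) : Int) by norm_num]; exact a3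
  have a2' : (PySem.Int.band w ((255 : Int) <<< ((2 : Int) * 8))) >>> ((2 : Int) * 8) = (n2 : Int) := by
    rw [show ((2 : Int) * 8) = ((16 : Nat) : Int) by norm_num]; exact a2
  have a1' : (PySem.Int.band w ((255 : Int) <<< ((1 : Int) * 8))) >>> ((1 : Int) * 8) = (n1 : Int) := by
    rw [show ((1 : Int) * 8) = ((8 : Nat) : Int) by norm_num]; exact a1
  have a0' : (PySem.Int.band w ((255 : Int) <<< ((0 : Int) * 8))) >>> ((0 : Int) * 8) = (n0 : Int) := by
    rw [show ((0 : Int) * 8) = ((0 : Nat) : Int) by norm_num]; exact a0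
  have b3' : PySem.Int.band (w >>> (24 : Int)) 255 = (n3 : Int) := by
    rw [show ((24 : Int)) = ((24 : Nat) : Int) from rfl]; exact b3
  have b2' : PySem.Int.band (w >>> (16 : Int)) 255 = (n2 : Int) := by
    rw [show ((16 : Int)) = ((16 : Nat) : Int) from rfl]; exact b2
  have b1' : PySem.Int.band (w >>> (8 : Int)) 255 = (n1 : Int) := by
    rw [show ((8 : Int)) = ((8 : Nat) : Int) from rfl]; exact b1
  have b0' : PySem.Int.band (w >>> (0 : Int)) 255 = (n0 : Int) := by
    rw [show ((0 : Int)) = ((0 : Nat) : Int) from rfl]; exact b0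
  unfold wordMovesA wordMovesB
  simp only [List.foldl_cons, List.foldl_nil, List.flatMap_cons, List.flatMap_nil]
  simp only [a3', a2', a1', a0']
  rw [inner_eq n3, inner_eq n2, inner_eq n1, inner_eq n0,
    b3', b2', b1', b0', Int.toNat_natCast, Int.toNat_natCast, Int.toNat_natCast,
    Int.toNat_natCast, getD_byteMoves n3 l3, getD_byteMoves n2 l2,
    getD_byteMoves n1 l1, getD_byteMoves n0 l0]
  simp [List.append_assoc]

theorem fold_all (l acc : List Int) :
    l.foldl wordMovesA acc = acc ++ l.flatMap wordMovesB := by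
  induction l generalizing acc with
  | nil => simp
  | cons w t ih =>
    rw [List.foldl_cons, List.flatMap_cons, ih, word_eq, List.append_assoc]

-- ===== VERDICT (by name: the statement is the Claim_ definition above) =====
theorem hash_to_moves_spec : Claim_equal_hash_to_moves := by
  intro hash _
  unfold Spec_hash_to_moves hash_to_moves hash_to_moves_alt
  rw [fold_all, List.nil_append]
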